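-- pv_equiv track=rewrite | github.com/truesanjik/yandex_algo_train | 2026_9.0/block1/contest2/taskB.py | folds
-- ===== SOURCE A (Python) =====
-- def folds(a: int, b: int):
--     if a <= b:
--         return 0
--     cnt = 0
--     while a > b:
--         b *= 2
--         cnt += 1
--     return cnt
-- ===== SOURCE B (Python) =====
-- def folds(a: int, b: int):
--     if a <= b:
--         return 0
--     m = -(-a // b)          # ceil(a / b)
--     return (m - 1).bit_length()
-- ===== Notes on version B (the rewrite author's own statement) =====
-- stated objective: simpler
-- what changed: Replaces the iterative doubling loop by a closed form: the answer is bit_length(ceil(a/b) - 1); Pre_ excludes a > b with b <= 0, where A's while loop never returns.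
import Mathlib
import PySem

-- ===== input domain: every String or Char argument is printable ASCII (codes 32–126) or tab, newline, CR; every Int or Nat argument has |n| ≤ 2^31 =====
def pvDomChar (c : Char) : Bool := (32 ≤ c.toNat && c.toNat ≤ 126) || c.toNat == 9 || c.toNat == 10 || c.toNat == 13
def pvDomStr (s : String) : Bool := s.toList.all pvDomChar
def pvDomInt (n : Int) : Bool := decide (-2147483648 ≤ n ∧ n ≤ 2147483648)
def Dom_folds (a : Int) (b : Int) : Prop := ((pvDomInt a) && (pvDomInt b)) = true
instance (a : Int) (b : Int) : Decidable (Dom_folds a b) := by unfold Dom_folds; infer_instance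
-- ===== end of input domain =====

-- B replaces A's doubling loop by the closed form bit_length(ceil(a/b)-1): no loop, one arithmetic expression.

-- ===== PORT A =====
-- A's while loop with fuel (a-b).toNat, which suffices when b ≥ 1 (each step shrinks a-b by at least 1)
def foldsLoop : Nat → Int → Int → Int → Int
  | 0, _, _, cnt => cnt
  | f+1, a, b, cnt => if b < a then foldsLoop f a (b*2) (cnt+1) else cnt

def folds (a : Int) (b : Int) : Int :=
  if a ≤ b then 0 else foldsLoop (a-b).toNat a b 0

-- ===== PORT B =====
def folds_alt (a : Int) (b : Int) : Int :=
  if a ≤ b then 0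
  else
    let m := -(PySem.Int.floordiv (-a) b)   -- -(-a // b) = ceil(a/b)
    ((PySem.Int.bitLength (m - 1) : Nat) : Int)

-- ===== PRECONDITION & SPEC =====
-- Pre_ excludes exactly the inputs (a > b with b ≤ 0) on which Python A never returns (the while loop runs forever).
def Pre_folds (a : Int) (b : Int) : Prop := a ≤ b ∨ 1 ≤ b
instance (a : Int) (b : Int) : Decidable (Pre_folds a b) := by unfold Pre_folds; infer_instance
def pvWitness_folds : Int × Int := (10, 1)

def Spec_folds (a : Int) (b : Int) (out : Int) : Prop := out = folds_alt a b
instance (a : Int) (b : Int) (out : Int) : Decidable (Spec_folds a b out) := by unfold Spec_folds; infer_instance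

-- ===== CLAIM (what is proved, stated in full; the proofs are below) =====
def Claim_equal_folds : Prop := ∀ (a : Int) (b : Int), Dom_folds a b → Pre_folds a b → Spec_folds a b (folds a b)

-- ===== LEMMAS AND PROOFS =====

-- ceil(a/b) = q iff (q-1)*b < a ≤ q*b  (from PySem); halving step of the ceiling
theorem ceil_double (a b : Int) (hb : 0 < b) (hab : b < a) :
    -(PySem.Int.floordiv (-a) (b*2)) = PySem.Int.floordiv (-(PySem.Int.floordiv (-a) b) - 1) 2 + 1 := by
  set c := -(PySem.Int.floordiv (-a) b) with hc
  have hcspec : (c - 1) * b < a ∧ a ≤ c * b :=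
    (PySem.Int.neg_floordiv_neg_eq_iff_of_pos hb).mp hc.symm
  set n := c - 1 with hn
  have hn1 : 1 ≤ n := by
    rcases hcspec with ⟨h1, h2⟩
    by_contra h
    push_neg at h
    have : c ≤ 1 := by omega
    nlinarith
  have hhalf : PySem.Int.floordiv n 2 = n / 2 := PySem.Int.floordiv_eq_ediv_of_pos (a := n) (b := 2) (by omega)
  rw [hhalf]
  rw [PySem.Int.neg_floordiv_neg_eq_iff_of_pos (by omega)]
  have hd : n / 2 * 2 ≤ n ∧ n ≤ n / 2 * 2 + 1 := by omega
  constructor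
  · have : (n / 2 + 1 - 1) * (b * 2) = (n / 2 * 2) * b := by ring
    rw [this]
    calc (n / 2 * 2) * b ≤ n * b := by nlinarith [hd.1]
    _ < a := hcspec.1
  · have : (n / 2 + 1) * (b * 2) = (n / 2 * 2 + 2) * b := by ring
    rw [this]
    calc a ≤ c * b := hcspec.2
    _ ≤ (n / 2 * 2 + 2) * b := by nlinarith [hd.2]

theorem loop_closed (f : Nat) : ∀ (a b cnt : Int), 1 ≤ b → b < a → (a - b).toNat ≤ f →
    foldsLoop f a b cnt = cnt + ((PySem.Int.bitLength (-(PySem.Int.floordiv (-a) b) - 1) : Nat) : Int) := by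
  induction f with
  | zero => intro a b cnt hb hab hf; omega
  | succ f ih =>
    intro a b cnt hb hab hf
    have hc := ceil_double a b (by omega) hab
    set c := -(PySem.Int.floordiv (-a) b) with hcdef
    have hcspec : (c - 1) * b < a ∧ a ≤ c * b :=
      (PySem.Int.neg_floordiv_neg_eq_iff_of_pos (by omega)).mp hcdef.symm
    have hn1 : 1 ≤ c - 1 := by
      rcases hcspec with ⟨h1, h2⟩
      by_contra h
      push_neg at h
      have : c ≤ 1 := by omega
      nlinarith
    have hbl : PySem.Int.bitLength (c - 1) =
        PySem.Int.bitLength (PySem.Int.floordiv (c - 1) 2) + 1 :=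
      PySem.Int.bitLength_of_pos (n := c - 1) (by omega)
    simp only [foldsLoop, if_pos hab]
    by_cases h2b : a ≤ b * 2
    · -- loop stops after this step; c = 2, bitLength 1 = 1
      have hc2 : c = 2 := by
        rcases hcspec with ⟨h1, h2⟩
        by_contra h
        have h3 : 3 ≤ c := by omega
        nlinarith
      have : foldsLoop f a (b*2) (cnt+1) = cnt + 1 := by
        cases f with
        | zero => rfl
        | succ f => simp [foldsLoop, not_lt.mpr h2b]
      rw [this, hc2]
      have h1 : ((PySem.Int.bitLength ((2:Int) - 1) : Nat) : Int) = 1 := by decide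
      omega
    · push_neg at h2b
      have hrec := ih a (b*2) (cnt+1) (by omega) h2b (by omega)
      rw [hrec, hc]
      have he : PySem.Int.floordiv (c - 1) 2 + 1 - 1 = PySem.Int.floordiv (c - 1) 2 := by ring
      rw [he, hbl]
      push_cast
      ring

-- ===== VERDICT (by name: the statement is the Claim_ definition above) =====
theorem folds_spec : Claim_equal_folds := by
  intro a b _ hpre
  unfold Spec_folds folds folds_alt
  by_cases hab : a ≤ b
  · simp [hab]
  · push_neg at hab
    have hb : 1 ≤ b := by rcases hpre with h | h; omega; exact h
    rw [if_neg (not_le.mpr hab), if_neg (not_le.mpr hab)]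
    simpa using loop_closed (a - b).toNat a b 0 hb hab le_rfl
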